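-- pv_equiv track=rewrite | github.com/contemptx/usenetsync | .github/scripts/ai-triage.py | _infer_cause
-- ===== SOURCE A (Python) =====
-- from typing import Dict, List, Any, Optional
--
-- def _infer_cause(failures: List[Dict[str, Any]]) -> str:
--     """Infer likely cause from failure patterns"""
--     messages = [f.get('message', '') for f in failures]
--
--     if any('timeout' in m.lower() for m in messages):
--         return "Timeout issues - possibly slow backend or network"
--     elif any('connection' in m.lower() for m in messages):
--         return "Connection issues - backend may not be running"
--     elif any('element not found' in m.lower() for m in messages):
--         return "DOM changes - elements have different selectors"
--     elif any('assertion' in m.lower() for m in messages):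
--         return "Logic changes - expected values have changed"
--
--     return "Unknown - requires manual investigation"
-- ===== SOURCE B (Python) =====
-- _KEYS = ["timeout", "connection", "element not found", "assertion"]
-- _VERDICTS = [
--     "Timeout issues - possibly slow backend or network",
--     "Connection issues - backend may not be running",
--     "DOM changes - elements have different selectors",
--     "Logic changes - expected values have changed",
-- ]
--
--
-- def _infer_cause(failures):
--     """Infer likely cause from failure patterns"""
--     # single pass keeping the running minimum matching-pattern index;
--     # the inner scan only looks at indices below the current best
--     best = len(_KEYS)
--     for f in failures:
--         text = f.get('message', '').lower()
--         for i in range(best):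
--             if _KEYS[i] in text:
--                 best = i
--                 break
--     if best == len(_KEYS):
--         return "Unknown - requires manual investigation"
--     return _VERDICTS[best]
-- ===== Notes on version B (the rewrite author's own statement) =====
-- stated objective: alternative
-- what changed: Replaces A's four separate short-circuit any() scans by a single pass over the failures that maintains a running minimum matching-pattern index (the inner scan is bounded by the current best), then indexes a verdict array by that minimum.
import Mathlib
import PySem

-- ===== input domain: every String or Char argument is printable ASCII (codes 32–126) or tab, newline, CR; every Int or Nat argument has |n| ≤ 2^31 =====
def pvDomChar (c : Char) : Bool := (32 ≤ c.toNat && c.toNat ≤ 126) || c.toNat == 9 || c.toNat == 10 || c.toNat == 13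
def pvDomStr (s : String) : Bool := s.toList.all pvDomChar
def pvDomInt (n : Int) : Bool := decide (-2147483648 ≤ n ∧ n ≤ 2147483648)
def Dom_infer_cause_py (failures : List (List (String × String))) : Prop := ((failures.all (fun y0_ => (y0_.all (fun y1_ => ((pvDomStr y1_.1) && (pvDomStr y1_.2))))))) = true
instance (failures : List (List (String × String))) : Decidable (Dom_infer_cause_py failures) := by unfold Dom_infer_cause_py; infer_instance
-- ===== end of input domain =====

-- B replaces A's four short-circuit any() scans by one pass keeping a running
-- minimum matching-pattern index, then indexes a verdict array (objective:
-- alternative decomposition, identical outputs).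

-- ===== PORT A =====
def infer_cause_py (failures : List (List (String × String))) : String :=
  let messages := failures.map (fun f => (PySem.Dict.mk f).getD "message" "")
  if messages.any (fun m => PySem.Str.isIn "timeout" (PySem.Str.lower m)) then
    "Timeout issues - possibly slow backend or network"
  else if messages.any (fun m => PySem.Str.isIn "connection" (PySem.Str.lower m)) then
    "Connection issues - backend may not be running"
  else if messages.any (fun m => PySem.Str.isIn "element not found" (PySem.Str.lower m)) then
    "DOM changes - elements have different selectors"
  else if messages.any (fun m => PySem.Str.isIn "assertion" (PySem.Str.lower m)) then
    "Logic changes - expected values have changed"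
  else
    "Unknown - requires manual investigation"

-- ===== PORT B =====
def pvKeys : List String := ["timeout", "connection", "element not found", "assertion"]
def pvVerdicts : List String :=
  ["Timeout issues - possibly slow backend or network",
   "Connection issues - backend may not be running",
   "DOM changes - elements have different selectors",
   "Logic changes - expected values have changed"]

-- Source B's inner loop 'for i in range(best): if _KEYS[i] in text: best = i; break'
def pvInner (text : String) : List String → Nat → Nat → Nat
  | [], _, best => best
  | k :: rest, i, best =>
      if i < best then
        if PySem.Str.isIn k text then i else pvInner text rest (i + 1) best
      else best

def infer_cause_py_alt (failures : List (List (String × String))) : String :=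
  let best := failures.foldl (fun best f =>
      pvInner (PySem.Str.lower ((PySem.Dict.mk f).getD "message" "")) pvKeys 0 best)
    pvKeys.length
  if best == pvKeys.length then "Unknown - requires manual investigation"
  -- _VERDICTS[best]: best < 4 is guaranteed here, so .getD is exact
  else pvVerdicts.getD best ""

-- ===== PRECONDITION & SPEC =====
def Spec_infer_cause_py (failures : List (List (String × String))) (out : String) : Prop := out = infer_cause_py_alt failures
instance (failures : List (List (String × String))) (out : String) : Decidable (Spec_infer_cause_py failures out) := by unfold Spec_infer_cause_py; infer_instance

-- ===== CLAIM (what is proved, stated in full; the proofs are below) =====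
def Claim_equal_infer_cause_py : Prop := ∀ (failures : List (List (String × String))), Dom_infer_cause_py failures → Spec_infer_cause_py failures (infer_cause_py failures)

-- ===== LEMMAS AND PROOFS =====

-- the lowered message of one failure record
def pvText (f : List (String × String)) : String :=
  PySem.Str.lower ((PySem.Dict.mk f).getD "message" "")

-- the first matching pattern index of a single message (4 = no match)
def pvIdx (t : String) : Nat :=
  if PySem.Str.isIn "timeout" t then 0
  else if PySem.Str.isIn "connection" t then 1
  else if PySem.Str.isIn "element not found" t then 2
  else if PySem.Str.isIn "assertion" t then 3
  else 4

-- the minimum matching index over the whole list, phrased with A's any-scans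
def pvChain (fs : List (List (String × String))) : Nat :=
  if fs.any (fun f => PySem.Str.isIn "timeout" (pvText f)) then 0
  else if fs.any (fun f => PySem.Str.isIn "connection" (pvText f)) then 1
  else if fs.any (fun f => PySem.Str.isIn "element not found" (pvText f)) then 2
  else if fs.any (fun f => PySem.Str.isIn "assertion" (pvText f)) then 3
  else 4

theorem pvIdx_le (t : String) : pvIdx t ≤ 4 := by
  unfold pvIdx; split_ifs <;> omega

theorem pvInner_eq (t : String) (b : Nat) (hb : b ≤ 4) :
    pvInner t pvKeys 0 b = min b (pvIdx t) := by
  simp only [pvKeys, pvInner, pvIdx]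
  split_ifs <;> omega

theorem pvChain_cons (f : List (String × String)) (fs : List (List (String × String))) :
    pvChain (f :: fs) = min (pvIdx (pvText f)) (pvChain fs) := by
  simp only [pvChain, pvIdx, List.any_cons, Bool.or_eq_true]
  rcases Bool.eq_false_or_eq_true (PySem.Str.isIn "timeout" (pvText f)) with h1 | h1 <;>
    rcases Bool.eq_false_or_eq_true (PySem.Str.isIn "connection" (pvText f)) with h2 | h2 <;>
    rcases Bool.eq_false_or_eq_true (PySem.Str.isIn "element not found" (pvText f)) with h3 | h3 <;>
    rcases Bool.eq_false_or_eq_true (PySem.Str.isIn "assertion" (pvText f)) with h4 | h4 <;>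
    simp only [h1, h2, h3, h4] <;> simp <;> split_ifs <;> omega

theorem pvChain_le (fs : List (List (String × String))) : pvChain fs ≤ 4 := by
  unfold pvChain; split_ifs <;> omega

theorem pvFold_eq (fs : List (List (String × String))) (b : Nat) (hb : b ≤ 4) :
    fs.foldl (fun best f => pvInner (pvText f) pvKeys 0 best) b = min b (pvChain fs) := by
  induction fs generalizing b with
  | nil => simp [pvChain]; omega
  | cons f fs ih =>
      have hidx := pvIdx_le (pvText f)
      rw [List.foldl_cons, pvInner_eq _ _ hb, ih _ (by omega), pvChain_cons]
      omega

-- ===== VERDICT (by name: the statement is the Claim_ definition above) =====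
theorem infer_cause_py_spec : Claim_equal_infer_cause_py := by
  intro fs _
  unfold Spec_infer_cause_py infer_cause_py infer_cause_py_alt
  simp only [List.any_map, Function.comp_def]
  rw [show (fun best f => pvInner (PySem.Str.lower ((PySem.Dict.mk f).getD "message" "")) pvKeys 0 best)
        = (fun best f => pvInner (pvText f) pvKeys 0 best) from rfl]
  rw [pvFold_eq fs pvKeys.length (by simp [pvKeys])]
  have h4 : min pvKeys.length (pvChain fs) = pvChain fs := by
    have := pvChain_le fs; simp [pvKeys]; omega
  rw [h4]
  have hk : pvKeys.length = 4 := rfl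
  rw [hk]
  unfold pvChain
  simp only [pvText]
  split_ifs <;> simp_all [pvVerdicts]
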